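-- pv_equiv track=rewrite | github.com/Chrisman2003/code-complexity-metrics | projectFolder/metrics/cyclomatic.py | basic_compute_cyclomatic
-- ===== SOURCE A (Python) =====
-- def basic_compute_cyclomatic(code: str) -> int:
--     # C++ control flow keywords and logical operators
--     control_keywords = [
--         'if', 'for', 'while', 'case', 'catch', 'switch', 'else', 'do', 'goto'
--     ]
--     logical_operators = ['&&', '||', '?', 'and', 'or']  # 'and', 'or' for alternative tokens
--     count = 0
--     for line in code.splitlines():
--         stripped = line.strip()
--         # Count control keywords at the start of the line (simple heuristic)
--         for keyword in control_keywords: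
--             if stripped.startswith(keyword):
--                 count += 1
--         # Count logical operators anywhere in the line
--         for op in logical_operators:
--             count += stripped.count(op)
--     return count + 1  # +1 for
-- ===== SOURCE B (Python) =====
-- def basic_compute_cyclomatic(code: str) -> int:
--     # Operators contain no whitespace/newline chars, so their global non-overlapping
--     # count equals the sum of per-stripped-line counts; count them on the whole string.
--     ops = sum(code.count(op) for op in ('&&', '||', '?', 'and', 'or'))
--     # No control keyword is a prefix of another, so at most one matches a line:
--     # a tuple startswith per line replaces the inner keyword loop.
--     keywords = ('if', 'for', 'while', 'case', 'catch', 'switch', 'else', 'do', 'goto')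
--     branches = sum(1 for line in code.splitlines() if line.strip().startswith(keywords))
--     return ops + branches + 1
-- ===== Notes on version B (the rewrite author's own statement) =====
-- stated objective: alternative
-- what changed: B counts the logical operators once globally on the whole string (valid since operators contain no whitespace/linebreak characters, so stripping and line-splitting cannot change their non-overlapping counts) and replaces the inner per-line keyword loop by a single tuple-startswith test per line (valid since no control keyword is a prefix of another, so at most one can match).
import Mathlib
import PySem

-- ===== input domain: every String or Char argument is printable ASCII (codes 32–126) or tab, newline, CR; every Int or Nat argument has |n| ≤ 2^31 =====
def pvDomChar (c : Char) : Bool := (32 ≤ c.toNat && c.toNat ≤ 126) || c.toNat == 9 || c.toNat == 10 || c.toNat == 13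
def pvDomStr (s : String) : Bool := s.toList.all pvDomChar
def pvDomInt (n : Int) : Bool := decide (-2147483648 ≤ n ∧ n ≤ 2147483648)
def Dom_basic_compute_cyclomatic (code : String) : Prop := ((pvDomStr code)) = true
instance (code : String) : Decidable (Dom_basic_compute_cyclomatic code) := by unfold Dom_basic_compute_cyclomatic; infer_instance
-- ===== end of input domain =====

-- B counts the logical operators once on the whole string and uses one prefix test per line
-- for the keywords (no keyword is a prefix of another); same value as A, alternative decomposition.

-- ===== PORT A =====
def basic_compute_cyclomatic (code : String) : Int :=
  let control_keywords : List String := ["if", "for", "while", "case", "catch", "switch", "else", "do", "goto"]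
  let logical_operators : List String := ["&&", "||", "?", "and", "or"]
  let count : Int :=
    (PySem.Str.splitlines code).foldl (fun count line =>
      let stripped := PySem.Str.strip line
      -- count control keywords at the start of the line
      let count := control_keywords.foldl
        (fun count keyword => if PySem.Str.startswith stripped keyword then count + 1 else count) count
      -- count logical operators anywhere in the line
      let count := logical_operators.foldl
        (fun count op => count + (PySem.Str.count stripped op : Int)) count
      count) 0
  count + 1

-- ===== PORT B =====
def basic_compute_cyclomatic_alt (code : String) : Int :=
  let ops : Int := ((["&&", "||", "?", "and", "or"] : List String).map
      (fun op => (PySem.Str.count code op : Int))).sum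
  let keywords : List String := ["if", "for", "while", "case", "catch", "switch", "else", "do", "goto"]
  let branches : Int :=
    ((PySem.Str.splitlines code).filter
      (fun line => keywords.any (fun kw => PySem.Str.startswith (PySem.Str.strip line) kw))).length
  ops + branches + 1

-- ===== PRECONDITION & SPEC =====
def Spec_basic_compute_cyclomatic (code : String) (out : Int) : Prop := out = basic_compute_cyclomatic_alt code
instance (code : String) (out : Int) : Decidable (Spec_basic_compute_cyclomatic code out) := by unfold Spec_basic_compute_cyclomatic; infer_instance

-- ===== CLAIM (what is proved, stated in full; the proofs are below) =====
def Claim_equal_basic_compute_cyclomatic : Prop := ∀ (code : String), Dom_basic_compute_cyclomatic code → Spec_basic_compute_cyclomatic code (basic_compute_cyclomatic code)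

-- ===== LEMMAS AND PROOFS =====

-- A structural-recursion version of Python's greedy non-overlapping substring count.
def cnt (sub : List Char) : List Char → Nat
  | [] => 0
  | c :: t =>
    if h : sub ≠ [] ∧ sub.isPrefixOf (c :: t) = true then
      cnt sub (List.drop sub.length (c :: t)) + 1
    else cnt sub t
termination_by l => l.length
decreasing_by
  · rcases h with ⟨hne, -⟩
    have : 1 ≤ sub.length := by
      cases sub with
      | nil => exact absurd rfl hne
      | cons a l => simp
    simp only [List.length_drop, List.length_cons]
    omega
  · simp

theorem cnt_nil (sub : List Char) : cnt sub [] = 0 := by rw [cnt]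

theorem not_prefix_cons_of_notMem {sub : List Char} {c : Char} {t : List Char}
    (hc : c ∉ sub) (hs : sub ≠ []) : ¬ sub <+: (c :: t) := by
  cases sub with
  | nil => exact absurd rfl hs
  | cons s0 ss =>
    intro h
    rw [List.cons_prefix_cons] at h
    exact hc (h.1 ▸ List.mem_cons_self)

theorem cnt_cons_of_notMem {sub : List Char} {c : Char} {t : List Char}
    (hc : c ∉ sub) : cnt sub (c :: t) = cnt sub t := by
  rw [cnt]
  rw [dif_neg]
  rintro ⟨hs, hp⟩
  exact not_prefix_cons_of_notMem hc hs (List.isPrefixOf_iff_prefix.mp hp)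

theorem cnt_eq_zero {sub l : List Char} (h : ∀ x ∈ l, x ∉ sub) : cnt sub l = 0 := by
  induction l with
  | nil => exact cnt_nil sub
  | cons c t ih =>
    rw [cnt_cons_of_notMem (h c List.mem_cons_self)]
    exact ih (fun x hx => h x (List.mem_cons_of_mem _ hx))

theorem prefix_append_cases {sub a b : List Char} (h : sub <+: a ++ b) :
    sub <+: a ∨ ∃ s2, sub = a ++ s2 ∧ s2 <+: b ∧ s2 ≠ [] := by
  by_cases hl : sub.length ≤ a.length
  · exact Or.inl (List.prefix_of_prefix_length_le h (List.prefix_append a b) hl)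
  · have ha : a <+: sub :=
      List.prefix_of_prefix_length_le (List.prefix_append a b) h (by omega)
    obtain ⟨s2, rfl⟩ := ha
    refine Or.inr ⟨s2, rfl, (List.prefix_append_right_inj a).mp h, ?_⟩
    intro hnil
    subst hnil
    simp at hl

theorem cnt_append_disjoint_aux {sub b : List Char} (hsub : sub ≠ [])
    (hb : ∀ x ∈ b, x ∉ sub) :
    ∀ n (a : List Char), a.length ≤ n → cnt sub (a ++ b) = cnt sub a := by
  intro n
  induction n with
  | zero =>
    intro a ha
    have : a = [] := List.length_eq_zero_iff.mp (Nat.le_zero.mp ha)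
    subst this
    simp [cnt_nil, cnt_eq_zero hb]
  | succ n ih =>
    intro a ha
    cases a with
    | nil => simp [cnt_nil, cnt_eq_zero hb]
    | cons x t =>
      by_cases hp : sub <+: (x :: t)
      · have hlen : sub.length ≤ (x :: t).length := hp.length_le
        have hp2 : sub <+: (x :: t) ++ b := hp.trans (List.prefix_append _ _)
        have h1 : 1 ≤ sub.length := by
          cases sub with
          | nil => exact absurd rfl hsub
          | cons a l => simp
        rw [show ((x :: t) ++ b) = x :: (t ++ b) by simp]
        rw [cnt, dif_pos ⟨hsub, List.isPrefixOf_iff_prefix.mpr (by simpa using hp2)⟩]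
        conv_rhs => rw [cnt]
        rw [dif_pos ⟨hsub, List.isPrefixOf_iff_prefix.mpr hp⟩]
        have hdrop : List.drop sub.length (x :: (t ++ b)) = List.drop sub.length (x :: t) ++ b := by
          rw [show (x :: (t ++ b)) = (x :: t) ++ b by simp]
          exact List.drop_append_of_le_length hlen
        rw [hdrop, ih _ (by simp only [List.length_drop, List.length_cons]; simp at ha; omega)]
      · have hp2 : ¬ sub <+: (x :: t) ++ b := by
          intro h
          rcases prefix_append_cases h with h' | ⟨s2, hsub2, hs2b, hs2ne⟩
          · exact hp h'
          · cases s2 with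
            | nil => exact hs2ne rfl
            | cons y ys =>
              have hyb : y ∈ b := hs2b.subset List.mem_cons_self
              have hysub : y ∈ sub := by
                rw [hsub2]; exact List.mem_append_right _ List.mem_cons_self
              exact hb y hyb hysub
        rw [show ((x :: t) ++ b) = x :: (t ++ b) by simp]
        rw [cnt, dif_neg (by rintro ⟨-, hpp⟩; exact hp2 (by simpa using List.isPrefixOf_iff_prefix.mp hpp))]
        conv_rhs => rw [cnt]
        rw [dif_neg (by rintro ⟨-, hpp⟩; exact hp (List.isPrefixOf_iff_prefix.mp hpp))]
        exact ih _ (by simp at ha ⊢; omega)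

theorem cnt_append_disjoint {sub a b : List Char} (hsub : sub ≠ [])
    (hb : ∀ x ∈ b, x ∉ sub) : cnt sub (a ++ b) = cnt sub a :=
  cnt_append_disjoint_aux hsub hb a.length a le_rfl

theorem cnt_space_prefix {sub sp m : List Char} (hns : ∀ x ∈ sub, PySem.Chars.isspace x = false)
    (hsp : ∀ x ∈ sp, PySem.Chars.isspace x = true) : cnt sub (sp ++ m) = cnt sub m := by
  induction sp with
  | nil => simp
  | cons c t ih =>
    have hc : c ∉ sub := by
      intro hmem
      have := hns c hmem
      rw [hsp c List.mem_cons_self] at this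
      exact absurd this (by simp)
    rw [List.cons_append, cnt_cons_of_notMem hc]
    exact ih (fun x hx => hsp x (List.mem_cons_of_mem _ hx))

theorem cnt_strip {sub : List Char} (hsub : sub ≠ [])
    (hns : ∀ x ∈ sub, PySem.Chars.isspace x = false) (l : List Char) :
    cnt sub (PySem.Chars.strip l) = cnt sub l := by
  have hdisj : ∀ (z : List Char), (∀ x ∈ z, PySem.Chars.isspace x = true) → ∀ x ∈ z, x ∉ sub := by
    intro z hz x hx hmem
    have := hns x hmem
    rw [hz x hx] at this
    exact absurd this (by simp)
  have h1 : l = List.takeWhile PySem.Chars.isspace l ++ PySem.Chars.lstrip l := by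
    rw [PySem.Chars.lstrip, List.takeWhile_append_dropWhile]
  have h2 : PySem.Chars.lstrip l =
      PySem.Chars.strip l ++ (List.takeWhile PySem.Chars.isspace (PySem.Chars.lstrip l).reverse).reverse := by
    rw [PySem.Chars.strip, PySem.Chars.rstrip]
    conv_lhs => rw [← List.reverse_reverse (PySem.Chars.lstrip l)]
    rw [← List.reverse_append, List.takeWhile_append_dropWhile]
  conv_rhs => rw [h1]
  rw [cnt_space_prefix hns (fun x hx => List.mem_takeWhile_imp hx)]
  conv_rhs => rw [h2]
  rw [cnt_append_disjoint hsub (hdisj _ (by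
    intro x hx
    rw [List.mem_reverse] at hx
    exact List.mem_takeWhile_imp hx))]

-- Python's non-overlapping count equals cnt (for a non-empty pattern).
theorem countgo_eq_cnt {sub : List Char} (hsub : sub ≠ []) :
    ∀ n (l : List Char) (acc : Nat), l.length ≤ n →
      PySem.Chars.count.go sub n l acc = acc + cnt sub l := by
  intro n
  induction n using Nat.strong_induction_on with
  | _ n ih =>
    intro l acc hl
    cases n with
    | zero =>
      have : l = [] := List.length_eq_zero_iff.mp (Nat.le_zero.mp hl)
      subst this
      rw [PySem.Chars.count.go.eq_def]
      simp [cnt_nil]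
    | succ m =>
      cases l with
      | nil =>
        rw [PySem.Chars.count.go.eq_def]
        simp [cnt_nil]
      | cons c t =>
        have h1 : 1 ≤ sub.length := by
          cases sub with
          | nil => exact absurd rfl hsub
          | cons a l => simp
        rw [PySem.Chars.count.go.eq_def]
        simp only []
        by_cases hp : sub.isPrefixOf (c :: t) = true
        · rw [if_pos hp]
          rw [ih m (Nat.lt_succ_self m) _ (acc + 1)
            (by simp only [List.length_drop, List.length_cons]; simp at hl; omega)]
          conv_rhs => rw [cnt, dif_pos ⟨hsub, hp⟩]
          omega
        · rw [if_neg hp]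
          rw [ih m (Nat.lt_succ_self m) t acc (by simp at hl; omega)]
          conv_rhs => rw [cnt, dif_neg (by rintro ⟨-, hpp⟩; exact hp hpp)]

theorem count_eq_cnt {sub : List Char} (hsub : sub ≠ []) (l : List Char) :
    PySem.Chars.count l sub = cnt sub l := by
  rw [PySem.Chars.count]
  rw [if_neg (by simpa using hsub)]
  simpa using countgo_eq_cnt hsub l.length l 0 le_rfl

theorem cnt_append_brk_aux {sub b : List Char} {c : Char} (hsub : sub ≠ []) (hc : c ∉ sub) :
    ∀ n (a : List Char), a.length ≤ n →
      cnt sub (a ++ c :: b) = cnt sub a + cnt sub (c :: b) := by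
  intro n
  induction n with
  | zero =>
    intro a ha
    have : a = [] := List.length_eq_zero_iff.mp (Nat.le_zero.mp ha)
    subst this
    simp [cnt_nil]
  | succ n ih =>
    intro a ha
    cases a with
    | nil => simp [cnt_nil]
    | cons x t =>
      by_cases hp : sub <+: (x :: t)
      · have hlen : sub.length ≤ (x :: t).length := hp.length_le
        have hp2 : sub <+: (x :: t) ++ c :: b := hp.trans (List.prefix_append _ _)
        have h1 : 1 ≤ sub.length := by
          cases sub with
          | nil => exact absurd rfl hsub
          | cons a l => simp
        rw [show ((x :: t) ++ c :: b) = x :: (t ++ c :: b) by simp]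
        rw [cnt, dif_pos ⟨hsub, List.isPrefixOf_iff_prefix.mpr (by simpa using hp2)⟩]
        conv_rhs => rw [cnt]
        rw [dif_pos ⟨hsub, List.isPrefixOf_iff_prefix.mpr hp⟩]
        have hdrop : List.drop sub.length (x :: (t ++ c :: b))
            = List.drop sub.length (x :: t) ++ c :: b := by
          rw [show (x :: (t ++ c :: b)) = (x :: t) ++ c :: b by simp]
          exact List.drop_append_of_le_length hlen
        rw [hdrop, ih _ (by simp only [List.length_drop, List.length_cons]; simp at ha; omega)]
        omega
      · have hp2 : ¬ sub <+: (x :: t) ++ c :: b := by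
          intro h
          rcases prefix_append_cases h with h' | ⟨s2, hsub2, hs2b, hs2ne⟩
          · exact hp h'
          · cases s2 with
            | nil => exact hs2ne rfl
            | cons y ys =>
              rw [List.cons_prefix_cons] at hs2b
              refine hc ?_
              rw [hsub2, ← hs2b.1]
              exact List.mem_append_right _ List.mem_cons_self
        rw [show ((x :: t) ++ c :: b) = x :: (t ++ c :: b) by simp]
        rw [cnt, dif_neg (by rintro ⟨-, hpp⟩; exact hp2 (by simpa using List.isPrefixOf_iff_prefix.mp hpp))]
        conv_rhs => rw [cnt]
        rw [dif_neg (by rintro ⟨-, hpp⟩; exact hp (List.isPrefixOf_iff_prefix.mp hpp))]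
        exact ih _ (by simp at ha ⊢; omega)

theorem cnt_append_brk {sub a b : List Char} {c : Char} (hsub : sub ≠ []) (hc : c ∉ sub) :
    cnt sub (a ++ c :: b) = cnt sub a + cnt sub (c :: b) :=
  cnt_append_brk_aux hsub hc a.length a le_rfl

-- Summing cnt over the pieces produced by splitlines.go gives cnt of the whole string,
-- provided the pattern contains no line-break character.
theorem go_sum {sub : List Char} {isB : Char → Bool} (hsub : sub ≠ [])
    (hbrk : ∀ c, isB c = true → c ∉ sub) (hr : '\r' ∉ sub) (hn : '\n' ∉ sub) :
    ∀ n (s cur : List Char) (acc : List (List Char)), s.length ≤ n →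
      ((PySem.Chars.splitlines.go isB s cur acc).map (cnt sub)).sum
        = (acc.map (cnt sub)).sum + cnt sub (cur.reverse ++ s) := by
  intro n
  induction n using Nat.strong_induction_on with
  | _ n ih =>
    intro s cur acc hl
    rw [PySem.Chars.splitlines.go.eq_def]
    split
    · -- s = []
      rcases cur with _ | ⟨d, ds⟩
      · simp [cnt_nil]
      · rw [if_neg (by simp)]
        simp [List.sum_reverse]
    · -- s = '\r' :: '\n' :: rest
      rename_i rest
      simp only [List.length_cons] at hl
      rw [ih rest.length (by omega) rest [] (cur.reverse :: acc) le_rfl]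
      rw [cnt_append_brk hsub hr, cnt_cons_of_notMem hr, cnt_cons_of_notMem hn]
      simp
      omega
    · -- s = c :: rest, not CRLF
      rename_i c rest _
      simp only [List.length_cons] at hl
      by_cases hB : isB c = true
      · rw [if_pos hB]
        have hc : c ∉ sub := hbrk c hB
        rw [ih rest.length (by omega) rest [] (cur.reverse :: acc) le_rfl]
        rw [cnt_append_brk hsub hc, cnt_cons_of_notMem hc]
        simp
        omega
      · rw [if_neg hB]
        rw [ih rest.length (by omega) rest (c :: cur) acc le_rfl]
        simp [List.append_assoc]

theorem splitlines_sum {sub : List Char} (hsub : sub ≠ [])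
    (hbrk : ∀ x ∈ sub, (decide (x.toNat = 10) || decide (x.toNat = 13) || decide (x.toNat = 11) ||
      decide (x.toNat = 12) || decide (x.toNat = 28) || decide (x.toNat = 29) ||
      decide (x.toNat = 30) || decide (x.toNat = 133) || decide (x.toNat = 8232) ||
      decide (x.toNat = 8233)) = false) (s : List Char) :
    ((PySem.Chars.splitlines s).map (cnt sub)).sum = cnt sub s := by
  have hbrk' : ∀ c : Char, (decide (c.toNat = 10) || decide (c.toNat = 13) || decide (c.toNat = 11) ||
      decide (c.toNat = 12) || decide (c.toNat = 28) || decide (c.toNat = 29) ||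
      decide (c.toNat = 30) || decide (c.toNat = 133) || decide (c.toNat = 8232) ||
      decide (c.toNat = 8233)) = true → c ∉ sub := by
    intro c hc hmem
    rw [hbrk c hmem] at hc
    exact absurd hc (by simp)
  have hr : '\r' ∉ sub := hbrk' '\r' (by decide)
  have hn : '\n' ∉ sub := hbrk' '\n' (by decide)
  rw [PySem.Chars.splitlines]
  simpa using go_sum hsub hbrk' hr hn s.length s [] [] le_rfl

-- at most one keyword from a pairwise non-prefix list can match a given line
theorem countP_startswith_eq_any (ks : List String) (s : String)
    (hp : ks.Pairwise (fun a b => ¬ a.toList <+: b.toList ∧ ¬ b.toList <+: a.toList)) :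
    (ks.countP (fun k => PySem.Str.startswith s k) : Int)
      = if ks.any (fun k => PySem.Str.startswith s k) then 1 else 0 := by
  induction ks with
  | nil => simp
  | cons k kt ih =>
    rw [List.pairwise_cons] at hp
    rw [List.countP_cons, List.any_cons]
    by_cases hk : PySem.Str.startswith s k = true
    · have hk' : k.toList <+: s.toList := by
        rw [PySem.Str.startswith_eq] at hk
        exact (PySem.Chars.startswith_iff _ _).mp hk
      have hz : kt.countP (fun b => PySem.Str.startswith s b) = 0 := by
        rw [List.countP_eq_zero]
        intro b hb hbs
        have hb' : b.toList <+: s.toList := by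
          rw [PySem.Str.startswith_eq] at hbs
          exact (PySem.Chars.startswith_iff _ _).mp hbs
        rcases List.prefix_or_prefix_of_prefix hk' hb' with h | h
        · exact (hp.1 b hb).1 h
        · exact (hp.1 b hb).2 h
      rw [hz]
      have hk2 : PySem.Chars.startswith s.toList k.toList = true := by
        rw [← PySem.Str.startswith_eq]; exact hk
      simp [hk2]
    · simp only [Bool.not_eq_true] at hk
      rw [hk]
      simpa using ih hp.2

-- per-operator main lemma, at the String level
theorem per_op (code : String) (op : String) (hsub : op.toList ≠ [])
    (hns : ∀ x ∈ op.toList, PySem.Chars.isspace x = false)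
    (hbrk : ∀ x ∈ op.toList, (decide (x.toNat = 10) || decide (x.toNat = 13) || decide (x.toNat = 11) ||
      decide (x.toNat = 12) || decide (x.toNat = 28) || decide (x.toNat = 29) ||
      decide (x.toNat = 30) || decide (x.toNat = 133) || decide (x.toNat = 8232) ||
      decide (x.toNat = 8233)) = false) :
    ((PySem.Str.splitlines code).map
        (fun line => (PySem.Str.count (PySem.Str.strip line) op : Int))).sum
      = (PySem.Str.count code op : Int) := by
  have hline : ∀ line : String,
      PySem.Str.count (PySem.Str.strip line) op = cnt op.toList line.toList := by
    intro line
    rw [PySem.Str.count_eq, PySem.Str.toList_strip, count_eq_cnt hsub, cnt_strip hsub hns]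
  have : ((PySem.Str.splitlines code).map
      (fun line => (PySem.Str.count (PySem.Str.strip line) op : Int))).sum
      = (((PySem.Str.splitlines code).map (fun line => cnt op.toList line.toList)).sum : Int) := by
    rw [Nat.cast_list_sum, List.map_map]
    congr 1
    apply List.map_congr_left
    intro line _
    simp only [Function.comp_apply, PySem.Str.count_eq, PySem.Str.toList_strip]
    rw [count_eq_cnt hsub, cnt_strip hsub hns]
  rw [this]
  have : (PySem.Str.splitlines code).map (fun line => cnt op.toList line.toList)
      = ((PySem.Str.splitlines code).map String.toList).map (cnt op.toList) := by
    rw [List.map_map]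
    rfl
  rw [this, PySem.Str.splitlines_map_toList, splitlines_sum hsub hbrk,
    PySem.Str.count_eq, count_eq_cnt hsub]

-- exchanging the two summations (lines / operators)
theorem sum_swap (L ops : List String) :
    (L.map (fun line => (ops.map
        (fun op => (PySem.Str.count (PySem.Str.strip line) op : Int))).sum)).sum
      = (ops.map (fun op => (L.map
        (fun line => (PySem.Str.count (PySem.Str.strip line) op : Int))).sum)).sum := by
  induction ops with
  | nil => simp
  | cons o ot ih =>
    simp only [List.map_cons, List.sum_cons]
    rw [← ih, ← PySem.List.sum_map_add_int]

-- ===== VERDICT (by name: the statement is the Claim_ definition above) =====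
set_option maxRecDepth 8192 in
theorem basic_compute_cyclomatic_spec : Claim_equal_basic_compute_cyclomatic := by
  intro code _
  unfold Spec_basic_compute_cyclomatic basic_compute_cyclomatic basic_compute_cyclomatic_alt
  simp only []
  have hbody : (fun (count : Int) (line : String) =>
      (["&&", "||", "?", "and", "or"] : List String).foldl
        (fun count op => count + (PySem.Str.count (PySem.Str.strip line) op : Int))
        ((["if", "for", "while", "case", "catch", "switch", "else", "do", "goto"] : List String).foldl
          (fun count keyword => if PySem.Str.startswith (PySem.Str.strip line) keyword then count + 1 else count)
          count))
      = fun (count : Int) (line : String) => count +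
        ((if (["if", "for", "while", "case", "catch", "switch", "else", "do", "goto"] : List String).any
            (fun k => PySem.Str.startswith (PySem.Str.strip line) k) then (1 : Int) else 0)
          + ((["&&", "||", "?", "and", "or"] : List String).map
              (fun op => (PySem.Str.count (PySem.Str.strip line) op : Int))).sum) := by
    funext a line
    rw [PySem.List.foldl_if_add_one, PySem.List.foldl_add,
      countP_startswith_eq_any _ _ (by decide)]
    ring
  rw [hbody, PySem.List.foldl_add, PySem.List.sum_map_add_int]
  rw [PySem.List.sum_map_ite_one_zero]
  rw [sum_swap]
  have hops : (["&&", "||", "?", "and", "or"] : List String).map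
      (fun op => ((PySem.Str.splitlines code).map
        (fun line => (PySem.Str.count (PySem.Str.strip line) op : Int))).sum)
      = (["&&", "||", "?", "and", "or"] : List String).map
        (fun op => (PySem.Str.count code op : Int)) := by
    apply List.map_congr_left
    intro op hop
    fin_cases hop <;>
      exact per_op _ _ (by decide) (by intro x hx; fin_cases hx <;> rfl)
        (by intro x hx; fin_cases hx <;> rfl)
  rw [hops, List.countP_eq_length_filter]
  ring
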